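-- pv_equiv track=rewrite | github.com/AndyLi-26/MAPF_sparkbug | robot_pose.py | best_match
-- ===== SOURCE A (Python) =====
-- LABEL2I = {'C':0,'M':1,'Y':2,'G':3}
--
-- def rot(seq, k): k %= len(seq); return seq[k:] + seq[:k]
--
-- def score(a, b): return sum(1 for x, y in zip(a, b) if x == y)
--
-- def best_match(labels, sequences):
--     obs = [LABEL2I.get(ch, 0) for ch in labels]
--     n   = len(obs)
--     best_id, best_sc, best_sh = -1, -1, 0
--     for sid, cand in enumerate(sequences):
--         if len(cand) != n: continue
--         for sh in range(n):
--             sc = score(obs, rot(cand, sh))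
--             if sc > best_sc: best_id, best_sc, best_sh = sid, sc, sh
--     return best_id, best_sc, best_sh
-- ===== SOURCE B (Python) =====
-- LABEL2I = {'C': 0, 'M': 1, 'Y': 2, 'G': 3}
--
-- def best_match(labels, sequences):
--     # Circular cross-correlation by position-difference histogram:
--     # index obs positions by symbol once; for each candidate accumulate all n
--     # shift scores at once (counts[(j-i)%n] += 1 for every matching pair),
--     # then scan the score vector.  No rotated copies are ever built.
--     obs = [LABEL2I.get(ch, 0) for ch in labels]
--     n = len(obs)
--     pos = {}
--     for i, x in enumerate(obs):
--         pos.setdefault(x, []).append(i)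
--     best_id, best_sc, best_sh = -1, -1, 0
--     for sid, cand in enumerate(sequences):
--         if len(cand) != n:
--             continue
--         counts = [0] * n
--         for j, y in enumerate(cand):
--             for i in pos.get(y, ()):
--                 counts[(j - i) % n] += 1
--         for sh in range(n):
--             if counts[sh] > best_sc:
--                 best_id, best_sc, best_sh = sid, counts[sh], sh
--     return best_id, best_sc, best_sh
-- ===== Notes on version B (the rewrite author's own statement) =====
-- stated objective: alternative
-- what changed: A scores every (candidate, shift) pair separately by materialising the rotated candidate (two slices) and zipping it against obs; B indexes obs positions by symbol once and, per candidate, computes all n shift scores simultaneously as a circular cross-correlation histogram (counts[(j-i)%n] += 1 for each symbol-matching position pair), then scans the score vector.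
import Mathlib
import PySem

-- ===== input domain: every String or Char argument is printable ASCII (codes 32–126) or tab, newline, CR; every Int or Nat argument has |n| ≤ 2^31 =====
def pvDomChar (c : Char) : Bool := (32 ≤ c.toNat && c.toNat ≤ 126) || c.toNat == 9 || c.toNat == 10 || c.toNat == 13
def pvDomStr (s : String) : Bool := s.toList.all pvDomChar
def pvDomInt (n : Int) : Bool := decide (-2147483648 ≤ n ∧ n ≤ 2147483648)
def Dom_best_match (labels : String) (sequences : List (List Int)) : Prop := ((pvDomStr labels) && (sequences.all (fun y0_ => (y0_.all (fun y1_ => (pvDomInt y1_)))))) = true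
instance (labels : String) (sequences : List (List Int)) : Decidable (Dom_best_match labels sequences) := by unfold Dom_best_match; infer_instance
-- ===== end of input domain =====

-- B replaces A's per-shift rotate-and-count scoring by a per-candidate circular cross-correlation:
-- obs positions are indexed by symbol once, every matching pair (j, i) bumps a shift-score histogram
-- at (j - i) % n, and the histogram is scanned — no rotated copies (objective: alternative).

-- ===== PORT A =====
def LABEL2I : PySem.Dict Char Int := ⟨[('C', 0), ('M', 1), ('Y', 2), ('G', 3)]⟩

def rot_ (seq : List Int) (k : Int) : List Int :=
  let k := PySem.Int.mod k (seq.length : Int)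
  PySem.List.slice seq (some k) none ++ PySem.List.slice seq none (some k)

def score_ (a b : List Int) : Int :=
  (a.zip b).foldl (fun acc q => if q.1 == q.2 then acc + 1 else acc) 0

def best_match (labels : String) (sequences : List (List Int)) : List Int :=
  let obs := labels.toList.map (fun ch => PySem.Dict.getD LABEL2I ch 0)
  let n : Int := (obs.length : Int)
  let r := (PySem.List.enumerate sequences 0).foldl
    (fun st p =>
      if ((p.2.length : Int) ≠ n) then st
      else (PySem.List.pyRange 0 n).foldl
        (fun st2 sh =>
          let sc := score_ obs (rot_ p.2 sh)
          if sc > st2.2.1 then (p.1, sc, sh) else st2) st)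
    ((-1 : Int), (-1 : Int), (0 : Int))
  [r.1, r.2.1, r.2.2]

-- ===== PORT B =====
-- pos.setdefault(x, []).append(i) == modify with default [] (append one element)
def posOf (obs : List Int) : PySem.Dict Int (List Int) :=
  (PySem.List.enumerate obs 0).foldl
    (fun d q => PySem.Dict.modify d q.2 [] (fun l => l ++ [q.1])) ⟨[]⟩

-- counts = [0]*n; for j, y in enumerate(cand): for i in pos.get(y, ()): counts[(j-i)%n] += 1
def countsOf (pos : PySem.Dict Int (List Int)) (n : Int) (cand : List Int) : List Int :=
  (PySem.List.enumerate cand 0).foldl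
    (fun cs q => (PySem.Dict.getD pos q.2 []).foldl
      (fun cs2 i => PySem.List.pySetD cs2 (PySem.Int.mod (q.1 - i) n)
          (PySem.List.pyGetD cs2 (PySem.Int.mod (q.1 - i) n) 0 + 1)) cs)
    (List.replicate n.toNat 0)

def best_match_alt (labels : String) (sequences : List (List Int)) : List Int :=
  let obs := labels.toList.map (fun ch => PySem.Dict.getD LABEL2I ch 0)
  let n : Int := (obs.length : Int)
  let pos := posOf obs
  let r := (PySem.List.enumerate sequences 0).foldl
    (fun st p =>
      if ((p.2.length : Int) ≠ n) then st
      else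
        let counts := countsOf pos n p.2
        (PySem.List.pyRange 0 n).foldl
          (fun st2 sh =>
            if PySem.List.pyGetD counts sh 0 > st2.2.1
            then (p.1, PySem.List.pyGetD counts sh 0, sh) else st2) st)
    ((-1 : Int), (-1 : Int), (0 : Int))
  [r.1, r.2.1, r.2.2]

-- ===== PRECONDITION & SPEC =====
def Spec_best_match (labels : String) (sequences : List (List Int)) (out : List Int) : Prop := out = best_match_alt labels sequences
instance (labels : String) (sequences : List (List Int)) (out : List Int) : Decidable (Spec_best_match labels sequences out) := by unfold Spec_best_match; infer_instance

-- ===== CLAIM (what is proved, stated in full; the proofs are below) =====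
def Claim_equal_best_match : Prop := ∀ (labels : String) (sequences : List (List Int)), Dom_best_match labels sequences → Spec_best_match labels sequences (best_match labels sequences)

-- ===== LEMMAS AND PROOFS =====

-- the histogram cell sh of B's counts IS A's rotation score at shift sh; supporting lemmas first
lemma pos_getD (obs : List Int) (v : Int) :
    (posOf obs).getD v []
      = ((PySem.List.enumerate obs 0).filter (fun q => q.2 == v)).map (fun q => q.1) := by
  unfold posOf
  have h : (PySem.List.enumerate obs 0).foldl
      (fun d q => PySem.Dict.modify d q.2 [] (fun l => l ++ [q.1])) (⟨[]⟩ : PySem.Dict Int (List Int))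
      = ((PySem.List.enumerate obs 0).map Prod.swap).foldl
      (fun d p => PySem.Dict.modify d p.1 [] (fun l => l ++ [p.2])) ⟨[]⟩ := by
    rw [List.foldl_map]
    rfl
  rw [h, PySem.Dict.getD_foldl_modify_append]
  rw [List.filter_map, List.map_map]
  rfl

lemma hist {α : Type} (f : α → Int) :
    ∀ (P : List α) (cs : List Int),
      (∀ p ∈ P, 0 ≤ f p ∧ f p < (cs.length : Int)) → ∀ (s : Nat), s < cs.length →
      (P.foldl (fun cs2 p => PySem.List.pySetD cs2 (f p) (PySem.List.pyGetD cs2 (f p) 0 + 1)) cs).getD s 0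
        = cs.getD s 0 + (P.countP (fun p => f p == (s : Int)) : Int) := by
  intro P
  induction P with
  | nil => intro cs _ s _; simp
  | cons x t ih =>
    intro cs hb s hs
    simp only [List.foldl_cons, List.countP_cons]
    obtain ⟨hx0, hxlt⟩ := hb x (by simp)
    set k : Nat := (f x).toNat with hk
    have hkl : k < cs.length := by omega
    have hset : PySem.List.pySetD cs (f x) (PySem.List.pyGetD cs (f x) 0 + 1)
        = cs.set k (cs.getD k 0 + 1) := by
      rw [PySem.List.pySetD_of_nonneg cs _ hx0]
      congr 1
      rw [PySem.List.pyGetD_eq_getElem cs 0 hx0 hxlt]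
      rw [List.getD_eq_getElem?_getD, List.getElem?_eq_getElem hkl]
      rfl
    rw [hset, ih _ (by
        intro p hp
        have := hb p (by simp [hp])
        simpa using this) s (by simpa using hs)]
    have hgd : (cs.set k (cs.getD k 0 + 1)).getD s 0
        = if ((f x == (s:Int)) : Bool) then cs.getD s 0 + 1 else cs.getD s 0 := by
      by_cases he : k = s
      · subst he
        have : ((f x == (k:Int)) : Bool) = true := by
          simp only [beq_iff_eq]; omega
        rw [this, if_pos rfl]
        rw [List.getD_eq_getElem?_getD, List.getElem?_set_self hkl]
        rfl
      · have : ((f x == (s:Int)) : Bool) = false := by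
          simp only [beq_eq_false_iff_ne, ne_eq]; omega
        rw [this, if_neg (by simp)]
        rw [List.getD_eq_getElem?_getD, List.getElem?_set_ne he, ← List.getD_eq_getElem?_getD]
    rw [hgd]
    by_cases hfx : ((f x == (s:Int)) : Bool) = true
    · rw [if_pos hfx, hfx]
      simp only [if_true]
      push_cast
      ring
    · rw [if_neg hfx]
      simp only [Bool.not_eq_true] at hfx
      rw [hfx]
      simp only [if_false, Bool.false_eq_true]
      push_cast
      ring

lemma mod_shift_iff (n j s k : Int) (hn : 0 < n) (hk0 : 0 ≤ k) (hklt : k < n)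
    (hs0 : 0 ≤ s) (hslt : s < n) :
    (PySem.Int.mod (j - k) n = s) ↔ k = PySem.Int.mod (j - s) n := by
  rw [PySem.Int.mod_eq_emod_of_pos hn, PySem.Int.mod_eq_emod_of_pos hn]
  constructor
  · intro h
    have h1 : (j - k) % n = s % n := by rw [h, Int.emod_eq_of_lt hs0 hslt]
    have h2 : ((j - k) - s) % n = 0 := Int.emod_eq_emod_iff_emod_sub_eq_zero.mp h1
    have h3 : n ∣ ((j - k) - s) := Int.dvd_iff_emod_eq_zero.mpr h2
    have h4 : n ∣ ((j - s) - k) := by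
      have : (j - s) - k = (j - k) - s := by ring
      rw [this]; exact h3
    have h5 : (j - s) % n = k % n := Int.emod_eq_emod_iff_emod_sub_eq_zero.mpr
      (Int.dvd_iff_emod_eq_zero.mp h4)
    rw [h5, Int.emod_eq_of_lt hk0 hklt]
  · intro h
    have h4 : n ∣ ((j - s) - k) := by
      have h5 : (j - s) % n = k % n := by rw [← h, Int.emod_eq_of_lt hk0 hklt]
      exact Int.dvd_iff_emod_eq_zero.mpr (Int.emod_eq_emod_iff_emod_sub_eq_zero.mp h5)
    have h3 : n ∣ ((j - k) - s) := by
      have : (j - k) - s = (j - s) - k := by ring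
      rw [this]; exact h4
    have h1 : (j - k) % n = s % n := Int.emod_eq_emod_iff_emod_sub_eq_zero.mpr
      (Int.dvd_iff_emod_eq_zero.mp h3)
    rw [h1, Int.emod_eq_of_lt hs0 hslt]

lemma range_countP_eq (g : Nat → Bool) : ∀ (n t : Nat), t < n →
    (List.range n).countP (fun k => (k == t) && g k) = if g t then 1 else 0 := by
  intro n
  induction n with
  | zero => intro t ht; omega
  | succ m ih =>
    intro t ht
    rw [List.range_succ, List.countP_append]
    by_cases htm : t < m
    · rw [ih t htm]
      have : (m == t) = false := by simp; omega
      simp [this]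
    · have ht' : t = m := by omega
      subst ht'
      have hz : (List.range t).countP (fun k => (k == t) && g k) = 0 := by
        rw [List.countP_eq_zero]
        intro a ha
        have : a < t := List.mem_range.mp ha
        simp; omega
      rw [hz]
      simp [List.countP_cons]

lemma mod_sub_toNat (n' k s : Nat) (hn : 0 < n') (hs : s < n') :
    (PySem.Int.mod ((k : Int) - (s : Int)) (n' : Int)).toNat = (k + n' - s) % n' := by
  rw [PySem.Int.mod_eq_emod_of_pos (by exact_mod_cast hn)]
  have h1 : ((k : Int) - s) % n' = ((k : Int) - s + n' * 1) % n' := by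
    rw [Int.add_mul_emod_self_left]
  have h2 : (k : Int) - s + n' * 1 = ((k + n' - s : Nat) : Int) := by omega
  rw [h1, h2]
  have h3 : (((k + n' - s : Nat) : Int)) % ((n' : Nat) : Int) = (((k + n' - s) % n' : Nat) : Int) := by
    norm_cast
  rw [h3]
  exact Int.toNat_natCast _

lemma back_mod (n' s i : Nat) (hs : s < n') (hi : i < n') :
    ((i + s) % n' + n' - s) % n' = i := by
  have e1 : (i + s) % n' + n' - s = (i + s) % n' + (n' - s) := by omega
  rw [e1, Nat.mod_add_mod]
  have e2 : i + s + (n' - s) = i + n' := by omega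
  rw [e2, Nat.add_mod_right, Nat.mod_eq_of_lt hi]

lemma reindex (n' s : Nat) (hn : 0 < n') (hs : s < n') (Qo Qc : Nat → Int) :
    (List.range n').countP (fun k => Qo ((k + n' - s) % n') == Qc k)
      = (List.range n').countP (fun i => Qo i == Qc ((i + s) % n')) := by
  have hperm : ((List.range n').map (fun i => (i + s) % n')).Perm (List.range n') := by
    apply List.Subperm.perm_of_length_le
    · apply List.subperm_of_subset
      · apply List.Nodup.map_on _ (List.nodup_range)
        intro i hi j hj hij
        have h1 := back_mod n' s i hs (List.mem_range.mp hi)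
        have h2 := back_mod n' s j hs (List.mem_range.mp hj)
        rw [← h1, ← h2, hij]
      · intro x hx
        obtain ⟨i, _, rfl⟩ := List.mem_map.mp hx
        exact List.mem_range.mpr (Nat.mod_lt _ hn)
    · simp
  rw [← hperm.countP_eq, List.countP_map]
  apply List.countP_congr
  intro i hi
  have hb := back_mod n' s i hs (List.mem_range.mp hi)
  simp only [Function.comp_apply, hb]

lemma score_eq (obs cand : List Int) (hlen : cand.length = obs.length)
    (s : Nat) (hs : s < obs.length) :
    score_ obs (rot_ cand (s : Int))
      = ((List.range obs.length).countP
          (fun i => obs.getD i 0 == cand.getD ((i + s) % obs.length) 0) : Int) := by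
  have hn : 0 < obs.length := by omega
  have hrot : rot_ cand (s : Int) = cand.rotate s := by
    show PySem.List.slice cand (some (PySem.Int.mod (s : Int) (cand.length : Int))) none ++
        PySem.List.slice cand none (some (PySem.Int.mod (s : Int) (cand.length : Int))) = cand.rotate s
    rw [PySem.Int.mod_natCast, Nat.mod_eq_of_lt (by omega),
        PySem.List.slice_from_natCast, PySem.List.slice_to_natCast,
        ← List.rotate_eq_drop_append_take (by omega)]
  have hzip : obs.zip (cand.rotate s)
      = (List.range obs.length).map
          (fun i => (obs.getD i 0, cand.getD ((i + s) % obs.length) 0)) := by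
    apply List.ext_getElem
    · simp [List.length_zip, hlen]
    · intro i h1 h2
      have hi : i < obs.length := by simpa [List.length_zip, hlen] using h1
      rw [List.getElem_zip, List.getElem_map, List.getElem_range]
      have hr : i < (cand.rotate s).length := by simp [hlen]; omega
      rw [List.getElem_rotate cand s i hr]
      have hidx : (i + s) % cand.length = (i + s) % obs.length := by rw [hlen]
      have hc : cand[(i + s) % cand.length]'(Nat.mod_lt _ (show 0 < cand.length by omega)) = cand.getD ((i + s) % obs.length) 0 := by
        rw [List.getD_eq_getElem?_getD, ← hidx,
            List.getElem?_eq_getElem (Nat.mod_lt _ (show 0 < cand.length by omega))]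
        rfl
      have ho : obs[i] = obs.getD i 0 := by
        rw [List.getD_eq_getElem?_getD, List.getElem?_eq_getElem hi]
        rfl
      rw [hc, ho]
  unfold score_
  rw [hrot, hzip, PySem.List.foldl_if_add_one
    (fun (q : Int × Int) => q.1 == q.2), List.countP_map]
  simp only [Function.comp_def]
  norm_num

lemma counts_getD (obs cand : List Int) (hlen : cand.length = obs.length)
    (sh : Int) (h0 : 0 ≤ sh) (hlt : sh < (obs.length : Int)) :
    PySem.List.pyGetD (countsOf (posOf obs) (obs.length : Int) cand) sh 0
      = score_ obs (rot_ cand sh) := by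
  have hnI : (0:Int) < (obs.length : Int) := lt_of_le_of_lt h0 hlt
  have hn : 0 < obs.length := by exact_mod_cast hnI
  set s : Nat := sh.toNat with hsdef
  have hsh : sh = (s : Int) := by omega
  have hsn : s < obs.length := by omega
  set P := (PySem.List.enumerate cand 0).flatMap
      (fun q => ((posOf obs).getD q.2 []).map (fun i => (q.1, i))) with hP
  have hflat : countsOf (posOf obs) (obs.length : Int) cand
      = P.foldl (fun cs2 p => PySem.List.pySetD cs2 (PySem.Int.mod (p.1 - p.2) (obs.length:Int))
          (PySem.List.pyGetD cs2 (PySem.Int.mod (p.1 - p.2) (obs.length:Int)) 0 + 1))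
          (List.replicate ((obs.length:Int)).toNat 0) := by
    unfold countsOf
    rw [hP, List.foldl_flatMap]
    simp only [List.foldl_map]
  have hbounds : ∀ p ∈ P, 0 ≤ PySem.Int.mod (p.1 - p.2) (obs.length:Int)
      ∧ PySem.Int.mod (p.1 - p.2) (obs.length:Int)
        < ((List.replicate ((obs.length:Int)).toNat (0:Int)).length : Int) := by
    intro p _
    refine ⟨PySem.Int.mod_nonneg _ hnI, ?_⟩
    have := PySem.Int.mod_lt (p.1 - p.2) hnI
    simp only [List.length_replicate, Int.toNat_natCast]
    exact this
  have hmain := hist (fun (p : Int × Int) => PySem.Int.mod (p.1 - p.2) (obs.length:Int)) P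
      (List.replicate ((obs.length:Int)).toNat 0) hbounds s
      (by simp only [List.length_replicate, Int.toNat_natCast]; omega)
  rw [hflat, hsh, PySem.List.pyGetD_natCast]
  rw [List.getD_eq_getElem?_getD] at hmain ⊢
  rw [← List.getD_eq_getElem?_getD] at hmain ⊢
  rw [hmain, List.getD_replicate 0 (by simp only [Int.toNat_natCast]; omega)]
  -- histogram count → per-position count over cand
  have hcount : (P.countP (fun p => PySem.Int.mod (p.1 - p.2) (obs.length:Int) == (s:Int)))
      = (List.range obs.length).countP
          (fun k => obs.getD ((k + obs.length - s) % obs.length) 0 == cand.getD k 0) := by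
    rw [hP, List.countP_flatMap]
    have hinner : ∀ q : Int × Int,
        (List.countP (fun p => PySem.Int.mod (p.1 - p.2) (obs.length:Int) == (s:Int))
          (((posOf obs).getD q.2 []).map (fun i => (q.1, i))))
        = if obs.getD (PySem.Int.mod (q.1 - (s:Int)) (obs.length:Int)).toNat 0 == q.2 then 1 else 0 := by
      intro q
      rw [List.countP_map, pos_getD, List.countP_map, List.countP_filter,
          PySem.List.enumerate_eq_map_pyRange obs 0, List.countP_map]
      simp only [PySem.List.len_eq]
      rw [PySem.List.pyRange_one 0 (obs.length : Int), List.countP_map]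
      simp only [Function.comp_def, Int.sub_zero, Int.toNat_natCast, zero_add,
        PySem.List.pyGetD_natCast]
      set t := (PySem.Int.mod (q.1 - (s:Int)) (obs.length:Int)).toNat with htdef
      have ht0 : 0 ≤ PySem.Int.mod (q.1 - (s:Int)) (obs.length:Int) := PySem.Int.mod_nonneg _ hnI
      have htlt : t < obs.length := by
        have := PySem.Int.mod_lt (q.1 - (s:Int)) hnI
        omega
      rw [List.countP_congr (q := fun k => (k == t) && (obs.getD k 0 == q.2)) ?_]
      · exact range_countP_eq (fun k => obs.getD k 0 == q.2) obs.length t htlt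
      · intro k hk
        have hklt : k < obs.length := List.mem_range.mp hk
        simp only [Bool.and_eq_true, beq_iff_eq]
        constructor
        · rintro ⟨h1, h2⟩
          refine ⟨?_, h2⟩
          have := (mod_shift_iff (obs.length:Int) q.1 (s:Int) (k:Int) hnI
            (by omega) (by exact_mod_cast hklt) (by omega) (by exact_mod_cast hsn)).mp h1
          omega
        · rintro ⟨h1, h2⟩
          refine ⟨?_, h2⟩
          apply (mod_shift_iff (obs.length:Int) q.1 (s:Int) (k:Int) hnI
            (by omega) (by exact_mod_cast hklt) (by omega) (by exact_mod_cast hsn)).mpr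
          omega
    rw [List.map_congr_left (fun q _ => by
      simp only [Function.comp_apply]
      exact hinner q)]
    rw [PySem.List.sum_map_ite_one_zero_nat
      (fun q : Int × Int => obs.getD (PySem.Int.mod (q.1 - (s:Int)) (obs.length:Int)).toNat 0 == q.2)
      (PySem.List.enumerate cand 0)]
    rw [PySem.List.enumerate_eq_map_pyRange cand 0, List.countP_map]
    simp only [PySem.List.len_eq, hlen]
    rw [PySem.List.pyRange_one 0 (obs.length : Int), List.countP_map]
    simp only [Function.comp_def, Int.sub_zero, Int.toNat_natCast, zero_add,
      PySem.List.pyGetD_natCast]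
    apply List.countP_congr
    intro k hk
    have hklt : k < obs.length := List.mem_range.mp hk
    rw [mod_sub_toNat obs.length k s hn hsn]
  simp only [hcount]
  rw [reindex obs.length s hn hsn (fun i => obs.getD i 0) (fun k => cand.getD k 0)]
  rw [score_eq obs cand hlen s hsn]
  omega

-- ===== VERDICT (by name: the statement is the Claim_ definition above) =====
theorem best_match_spec : Claim_equal_best_match := by
  intro labels sequences _
  unfold Spec_best_match best_match best_match_alt
  apply congrArg (fun (r : Int × Int × Int) => [r.1, r.2.1, r.2.2])
  apply PySem.List.foldl_congr_mem
  intro st p _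
  by_cases hl : ((p.2.length : Int) ≠ ((labels.toList.map (fun ch => PySem.Dict.getD LABEL2I ch 0)).length : Int))
  · rw [if_pos hl, if_pos hl]
  · rw [if_neg hl, if_neg hl]
    rw [not_not] at hl
    apply PySem.List.foldl_congr_mem
    intro st2 sh hsh
    obtain ⟨hs0, hslt⟩ := PySem.List.mem_pyRange_one.mp hsh
    rw [counts_getD _ _ (by exact_mod_cast hl) sh hs0 hslt]
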